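-- pv_equiv track=rewrite | github.com/daniel-reich/turbo-robot | fRZMqCpyxpSgmriQ6_21.py | sorting
-- ===== SOURCE A (Python) =====
-- def sorting(s):
--     lst=[]
--     lst2=[]
--     for i in s:
--         if i.islower():
--             lst.append(i)
--         elif i.isupper():
--             lst.append(i)
--     lst.sort(key=lambda x:[ord(x.lower()),121-ord(x)])
--     for i in s:
--         if i.isdigit():
--             lst2.append(i)
--     lst2.sort()
--     return ''.join(lst)+''.join(lst2)
-- ===== SOURCE B (Python) =====
-- def sorting(s):
--     # Counting over the fixed alphabet: for each letter a..z emit its lowercase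
--     # then uppercase occurrences, then the digits 0..9 in order; no comparison sort.
--     out = []
--     for k in range(26):
--         lo = chr(97 + k)
--         up = chr(65 + k)
--         out.append(lo * s.count(lo))
--         out.append(up * s.count(up))
--     for k in range(10):
--         d = chr(48 + k)
--         out.append(d * s.count(d))
--     return ''.join(out)
-- ===== Notes on version B (the rewrite author's own statement) =====
-- stated objective: faster
-- what changed: Replaced the two comparison sorts over the extracted letter/digit lists by a counting scheme over the fixed 62-symbol alphabet: for each letter a..z emit its lowercase then uppercase occurrences (the order A's key enforces), then each digit 0..9, so no sort is performed at all.
import Mathlib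
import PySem

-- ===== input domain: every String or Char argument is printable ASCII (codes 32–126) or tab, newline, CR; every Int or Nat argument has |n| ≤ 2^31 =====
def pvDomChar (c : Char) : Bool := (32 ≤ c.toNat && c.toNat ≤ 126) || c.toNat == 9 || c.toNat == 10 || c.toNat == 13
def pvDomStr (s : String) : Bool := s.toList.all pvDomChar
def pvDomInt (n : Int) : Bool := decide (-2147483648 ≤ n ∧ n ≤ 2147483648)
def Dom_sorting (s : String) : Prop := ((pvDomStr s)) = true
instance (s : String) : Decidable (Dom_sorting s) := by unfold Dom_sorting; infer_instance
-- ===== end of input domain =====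

-- B replaces A's two comparison sorts by counting over the fixed 52-letter + 10-digit alphabet; measured faster.

-- ===== PORT A =====
-- key lambda x: [ord(x.lower()), 121 - ord(x)] is a 2-element-list key, i.e. a lexicographic
-- 2-key sort (PySem.List.sorted2); ord(x.lower()) on the 1-char string x is exact via lowerChar.
def sorting (s : String) : String :=
  let lst : List Char := s.toList.foldl
    (fun acc i => if PySem.Chars.islower i then acc ++ [i]
                  else if PySem.Chars.isupper i then acc ++ [i] else acc) []
  let lstSorted := PySem.List.sorted2 lst
      (fun x => ((PySem.Chars.lowerChar x).toNat : Int))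
      (fun x => (121 : Int) - (x.toNat : Int)) false
  let lst2 : List Char := s.toList.foldl
    (fun acc i => if PySem.Chars.isdigit i then acc ++ [i] else acc) []
  let lst2Sorted := PySem.List.sorted lst2 (fun x => x) false
  String.ofList (lstSorted ++ lst2Sorted)

-- ===== PORT B =====
-- Python's s.count(c) with a one-character needle is exactly the character count: ported as List.count.
def sorting_alt (s : String) : String :=
  let cs := s.toList
  let out1 : List (List Char) := (PySem.List.pyRange 0 26 1).foldl
    (fun acc k =>
      (acc ++ [List.replicate (cs.count (Char.ofNat (97 + k).toNat)) (Char.ofNat (97 + k).toNat)])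
           ++ [List.replicate (cs.count (Char.ofNat (65 + k).toNat)) (Char.ofNat (65 + k).toNat)]) []
  let out : List (List Char) := (PySem.List.pyRange 0 10 1).foldl
    (fun acc k =>
      acc ++ [List.replicate (cs.count (Char.ofNat (48 + k).toNat)) (Char.ofNat (48 + k).toNat)]) out1
  String.ofList out.flatten

-- ===== PRECONDITION & SPEC =====
def Spec_sorting (s : String) (out : String) : Prop := out = sorting_alt s
instance (s : String) (out : String) : Decidable (Spec_sorting s out) := by unfold Spec_sorting; infer_instance

-- ===== CLAIM (what is proved, stated in full; the proofs are below) =====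
def Claim_equal_sorting : Prop := ∀ (s : String), Dom_sorting s → Spec_sorting s (sorting s)

-- ===== LEMMAS AND PROOFS =====

-- the single Int key equivalent (on letters) to A's lexicographic pair key
def pvK (c : Char) : Int := 64 * ((PySem.Chars.lowerChar c).toNat : Int) - (c.toNat : Int)

-- the 52 letters in the order A's key sorts distinct letters (lowercase before uppercase)
def pvLetters : List Char :=
  ['a','A','b','B','c','C','d','D','e','E','f','F','g','G','h','H','i','I','j','J','k','K','l','L',
   'm','M','n','N','o','O','p','P','q','Q','r','R','s','S','t','T','u','U','v','V','w','W','x','X',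
   'y','Y','z','Z']

def pvDigits : List Char := ['0','1','2','3','4','5','6','7','8','9']

def pvBuckets (cs : List Char) (ds : List Char) : List Char :=
  (ds.map (fun d => List.replicate (cs.count d) d)).flatten

theorem pvFoldlIf (cs : List Char) (p : Char → Bool) (init : List Char) :
    cs.foldl (fun acc i => if p i then acc ++ [i] else acc) init = init ++ cs.filter p := by
  induction cs generalizing init with
  | nil => simp
  | cons c cs ih => by_cases h : p c <;> simp [h, ih]

theorem pvLstFilter (cs : List Char) :
    cs.foldl (fun acc i => if PySem.Chars.islower i then acc ++ [i]
                  else if PySem.Chars.isupper i then acc ++ [i] else acc) []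
    = cs.filter (fun c => PySem.Chars.islower c || PySem.Chars.isupper c) := by
  have e : (fun (acc : List Char) i => if PySem.Chars.islower i then acc ++ [i]
                  else if PySem.Chars.isupper i then acc ++ [i] else acc)
      = fun acc i => if (PySem.Chars.islower i || PySem.Chars.isupper i) then acc ++ [i] else acc := by
    funext acc i
    by_cases h1 : PySem.Chars.islower i <;> by_cases h2 : PySem.Chars.isupper i <;> simp [h1, h2]
  rw [e, pvFoldlIf, List.nil_append]

theorem pvInsertByCongr (b1 b2 : Char → Char → Bool) (x : Char) (ys : List Char)
    (h : ∀ y ∈ ys, b1 x y = b2 x y) :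
    PySem.List.insertBy b1 x ys = PySem.List.insertBy b2 x ys := by
  induction ys with
  | nil => rfl
  | cons y ys ih =>
    have hy := h y (by simp)
    simp only [PySem.List.insertBy, hy]
    split
    · rfl
    · have := ih (fun z hz => h z (by simp [hz]))
      simp [this]

theorem pvFoldlInsertByCongr (b1 b2 : Char → Char → Bool) (xs acc : List Char)
    (h : ∀ a ∈ xs, ∀ y, (y ∈ acc ∨ y ∈ xs) → b1 a y = b2 a y) :
    xs.foldl (fun acc x => PySem.List.insertBy b1 x acc) acc
      = xs.foldl (fun acc x => PySem.List.insertBy b2 x acc) acc := by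
  induction xs generalizing acc with
  | nil => rfl
  | cons x xs ih =>
    simp only [List.foldl_cons]
    rw [pvInsertByCongr b1 b2 x acc (fun y hy => h x (by simp) y (Or.inl hy))]
    exact ih _ (fun a ha y hy => by
      refine h a (by simp [ha]) y ?_
      rcases hy with hy | hy
      · rw [PySem.List.mem_insertBy] at hy
        rcases hy with rfl | hy
        · exact Or.inr (by simp)
        · exact Or.inl hy
      · exact Or.inr (by simp [hy]))

set_option maxHeartbeats 1000000 in
theorem pvMemLetters (c : Char) :
    c ∈ pvLetters ↔ (PySem.Chars.islower c || PySem.Chars.isupper c) = true := by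
  constructor
  · intro h; fin_cases h <;> decide
  · intro h
    have hb : (65 ≤ c.toNat ∧ c.toNat ≤ 90) ∨ (97 ≤ c.toNat ∧ c.toNat ≤ 122) := by
      simp [PySem.Chars.islower, PySem.Chars.isupper, Char.le_def] at h
      rcases h with h | h
      · right; exact ⟨h.1, h.2⟩
      · left; exact ⟨h.1, h.2⟩
    obtain ⟨n, hn⟩ : ∃ n, c.toNat = n := ⟨c.toNat, rfl⟩
    have hc : c = Char.ofNat n := by rw [← hn, Char.ofNat_toNat]
    rw [hn] at hb; rw [hc]
    rcases hb with ⟨h1, h2⟩ | ⟨h1, h2⟩ <;> interval_cases n <;> decide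

set_option maxHeartbeats 1000000 in
theorem pvMemDigits (c : Char) : c ∈ pvDigits ↔ PySem.Chars.isdigit c = true := by
  constructor
  · intro h; fin_cases h <;> decide
  · intro h
    have hb : 48 ≤ c.toNat ∧ c.toNat ≤ 57 := by
      simp [PySem.Chars.isdigit, Char.le_def] at h; exact ⟨h.1, h.2⟩
    obtain ⟨n, hn⟩ : ∃ n, c.toNat = n := ⟨c.toNat, rfl⟩
    have hc : c = Char.ofNat n := by rw [← hn, Char.ofNat_toNat]
    rw [hn] at hb; rw [hc]
    obtain ⟨h1, h2⟩ := hb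
    interval_cases n <;> decide

theorem pvCountBuckets (cs ds : List Char) (hnd : ds.Nodup) (c : Char) :
    (pvBuckets cs ds).count c = if c ∈ ds then cs.count c else 0 := by
  induction ds with
  | nil => simp [pvBuckets]
  | cons d ds ih =>
    simp only [pvBuckets, List.map_cons, List.flatten_cons, List.count_append] at *
    rw [ih hnd.of_cons]
    rcases List.nodup_cons.mp hnd with ⟨hd, _⟩
    by_cases h : c = d
    · subst h; simp [hd]
    · simp [List.count_replicate, h, Ne.symm h, List.mem_cons]

theorem pvPairwiseBuckets (cs ds : List Char) (S : Char → Char → Prop)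
    (hrefl : ∀ d, S d d) (hp : ds.Pairwise S) : (pvBuckets cs ds).Pairwise S := by
  induction ds with
  | nil => simp [pvBuckets]
  | cons d ds ih =>
    rcases List.pairwise_cons.mp hp with ⟨hd, hp'⟩
    simp only [pvBuckets, List.map_cons, List.flatten_cons]
    apply List.pairwise_append.mpr
    refine ⟨List.pairwise_replicate.mpr (Or.inr (hrefl d)), ih hp', ?_⟩
    intro a ha b hb
    rcases List.eq_of_mem_replicate ha with rfl
    have : ∃ d' ∈ ds, b ∈ List.replicate (cs.count d') d' := by
      simpa [pvBuckets, List.mem_flatten] using hb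
    rcases this with ⟨e, he, hb'⟩
    have hbe := List.eq_of_mem_replicate hb'
    subst hbe
    exact hd _ he

theorem pvPermBuckets (cs : List Char) (p : Char → Bool) (ds : List Char) (hnd : ds.Nodup)
    (hmem : ∀ c, c ∈ ds ↔ p c = true) :
    (pvBuckets cs ds).Perm (cs.filter p) := by
  apply List.perm_iff_count.mpr
  intro a
  rw [pvCountBuckets cs ds hnd a]
  by_cases h : p a
  · rw [List.count_filter h, if_pos ((hmem a).mpr h)]
  · rw [if_neg (fun hm => h ((hmem a).mp hm))]
    have : a ∉ cs.filter p := fun hm => h (List.of_mem_filter hm)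
    simp [List.count_eq_zero.mpr this]

theorem pvLowerCharToNat (c : Char) :
    (PySem.Chars.lowerChar c).toNat = if PySem.Chars.isupper c then c.toNat + 32 else c.toNat := by
  unfold PySem.Chars.lowerChar
  split
  · next h =>
    have hb : c.toNat ≤ 90 := by
      simp [PySem.Chars.isupper, Char.le_def] at h; exact h.2
    rw [Char.toNat_ofNat, if_pos (by unfold Nat.isValidChar; omega)]
  · next h => simp

theorem pvUpperBounds (c : Char) (h : PySem.Chars.isupper c = true) :
    65 ≤ c.toNat ∧ c.toNat ≤ 90 := by
  simpa [PySem.Chars.isupper, Char.le_def] using h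

theorem pvLowerBounds (c : Char) (h : PySem.Chars.islower c = true) :
    97 ≤ c.toNat ∧ c.toNat ≤ 122 := by
  simpa [PySem.Chars.islower, Char.le_def] using h

theorem pvKInj : Function.Injective pvK := by
  intro a b h
  unfold pvK at h
  rw [pvLowerCharToNat a, pvLowerCharToNat b] at h
  apply (fun hn => by rw [← Char.ofNat_toNat a, hn, Char.ofNat_toNat] : a.toNat = b.toNat → a = b)
  rcases ha : PySem.Chars.isupper a with _ | _ <;> rcases hb : PySem.Chars.isupper b with _ | _ <;>
    simp [ha, hb] at h
  · omega
  · rcases pvUpperBounds b hb with ⟨h1, h2⟩; omega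
  · rcases pvUpperBounds a ha with ⟨h1, h2⟩; omega
  · omega

theorem pvKeyLex (a b : Char)
    (ha : (PySem.Chars.islower a || PySem.Chars.isupper a) = true)
    (hb : (PySem.Chars.islower b || PySem.Chars.isupper b) = true) :
    (decide (((PySem.Chars.lowerChar a).toNat : Int) < ((PySem.Chars.lowerChar b).toNat : Int)) ||
      (!decide (((PySem.Chars.lowerChar b).toNat : Int) < ((PySem.Chars.lowerChar a).toNat : Int)) &&
        decide ((121 : Int) - (a.toNat : Int) < (121 : Int) - (b.toNat : Int))))
    = decide (pvK a < pvK b) := by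
  unfold pvK
  have Ba := pvUpperBounds a
  have Bb := pvUpperBounds b
  have Ba' : PySem.Chars.isupper a = false → 97 ≤ a.toNat ∧ a.toNat ≤ 122 := by
    intro h; rcases Bool.or_eq_true_iff.mp ha with hl | hu
    · exact pvLowerBounds a hl
    · rw [hu] at h; cases h
  have Bb' : PySem.Chars.isupper b = false → 97 ≤ b.toNat ∧ b.toNat ≤ 122 := by
    intro h; rcases Bool.or_eq_true_iff.mp hb with hl | hu
    · exact pvLowerBounds b hl
    · rw [hu] at h; cases h
  rw [pvLowerCharToNat a, pvLowerCharToNat b]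
  rcases hua : PySem.Chars.isupper a with _ | _ <;> rcases hub : PySem.Chars.isupper b with _ | _ <;>
    [(replace Ba := Ba' hua; replace Bb := Bb' hub);
     (replace Ba := Ba' hua; replace Bb := Bb hub);
     (replace Ba := Ba hua; replace Bb := Bb' hub);
     (replace Ba := Ba hua; replace Bb := Bb hub)] <;>
    simp only [Bool.false_eq_true, if_false, if_true] <;>
    rw [Bool.eq_iff_iff] <;>
    simp only [Bool.or_eq_true, Bool.and_eq_true, Bool.not_eq_true', decide_eq_true_eq,
      decide_eq_false_iff_not] <;>
    omega

theorem pvSorted2EqSortedK (L : List Char)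
    (hL : ∀ c ∈ L, (PySem.Chars.islower c || PySem.Chars.isupper c) = true) :
    PySem.List.sorted2 L (fun x => ((PySem.Chars.lowerChar x).toNat : Int))
        (fun x => (121 : Int) - (x.toNat : Int)) false
      = PySem.List.sorted L pvK false := by
  show L.foldl (fun acc x => PySem.List.insertBy _ x acc) []
      = L.foldl (fun acc x => PySem.List.insertBy _ x acc) []
  apply pvFoldlInsertByCongr
  intro a haL y hy
  have hya : y ∈ L := by rcases hy with hy | hy; exacts [absurd hy (by simp), hy]
  exact pvKeyLex a y (hL a haL) (hL y hya)

theorem pvLettersSide (cs : List Char) :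
    PySem.List.sorted2 (cs.filter (fun c => PySem.Chars.islower c || PySem.Chars.isupper c))
        (fun x => ((PySem.Chars.lowerChar x).toNat : Int))
        (fun x => (121 : Int) - (x.toNat : Int)) false
      = pvBuckets cs pvLetters := by
  rw [pvSorted2EqSortedK _ (fun c hc => (List.mem_filter.mp hc).2)]
  have hperm := pvPermBuckets cs (fun c => PySem.Chars.islower c || PySem.Chars.isupper c)
    pvLetters (by decide) pvMemLetters
  rw [PySem.List.sorted_eq_sorted_of_perm _ _ pvK pvKInj hperm.symm]
  apply PySem.List.sorted_eq_self_of_pairwise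
  apply pvPairwiseBuckets _ _ (fun a b => pvK a ≤ pvK b) (fun d => le_refl _)
  have hlt : pvLetters.Pairwise (fun a b => pvK a < pvK b) := by decide
  exact hlt.imp (fun h => le_of_lt h)

theorem pvDigitsSide (cs : List Char) :
    PySem.List.sorted (cs.filter (fun c => PySem.Chars.isdigit c)) (fun x => x) false
      = pvBuckets cs pvDigits := by
  have hperm := pvPermBuckets cs (fun c => PySem.Chars.isdigit c) pvDigits (by decide) pvMemDigits
  rw [PySem.List.sorted_eq_sorted_of_perm _ _ _ (fun x y h => h) hperm.symm]
  apply PySem.List.sorted_eq_self_of_pairwise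
  apply pvPairwiseBuckets _ _ (fun a b : Char => a ≤ b) (fun d => le_refl _)
  have hlt : pvDigits.Pairwise (fun a b : Char => a < b) := by decide
  exact hlt.imp (fun h => le_of_lt h)

set_option maxRecDepth 10000 in
set_option maxHeartbeats 4000000 in
theorem pvAltEq (s : String) :
    sorting_alt s = String.ofList (pvBuckets s.toList pvLetters ++ pvBuckets s.toList pvDigits) := by
  have h26 : PySem.List.pyRange 0 26 1
      = [0,1,2,3,4,5,6,7,8,9,10,11,12,13,14,15,16,17,18,19,20,21,22,23,24,25] := by decide
  have h10 : PySem.List.pyRange 0 10 1 = [0,1,2,3,4,5,6,7,8,9] := by decide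
  unfold sorting_alt
  rw [h26, h10]
  simp only [List.foldl_cons, List.foldl_nil]
  simp [pvBuckets, pvLetters, pvDigits]

-- ===== VERDICT (by name: the statement is the Claim_ definition above) =====
theorem sorting_spec : Claim_equal_sorting := by
  intro s _
  show sorting s = sorting_alt s
  have h : sorting s = String.ofList
      (PySem.List.sorted2 (s.toList.foldl
          (fun acc i => if PySem.Chars.islower i then acc ++ [i]
                  else if PySem.Chars.isupper i then acc ++ [i] else acc) [])
        (fun x => ((PySem.Chars.lowerChar x).toNat : Int))
        (fun x => (121 : Int) - (x.toNat : Int)) false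
      ++ PySem.List.sorted (s.toList.foldl
          (fun acc i => if PySem.Chars.isdigit i then acc ++ [i] else acc) []) (fun x => x) false) := rfl
  rw [h, pvAltEq, pvLstFilter, pvFoldlIf, List.nil_append, pvLettersSide, pvDigitsSide]
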